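-- pv_equiv track=rewrite | github.com/Artasov/xlartas | backend/apps/harmony/services/harmony/chords_progressions.py | get_values_by_template
-- ===== SOURCE A (Python) =====
-- def get_values_by_template(template, listLists):
--     result = []
--
--     for inner_list in listLists:
--         current_result = []
--         for i, element in enumerate(template):
--             if element == '*':
--                 current_result.append(inner_list[i])
--             else:
--                 current_result.append(element)
--         result.append(current_result)
--
--     return result
-- ===== SOURCE B (Python) =====
-- def get_values_by_template(template, listLists):
--     # Column-major: build one full column per template position, then transpose.
--     n = len(listLists)
--     cols = []
--     for i, e in enumerate(template):
--         if e == '*':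
--             cols.append([inner[i] for inner in listLists])
--         else:
--             cols.append([e] * n)
--     return [[col[j] for col in cols] for j in range(n)]
-- ===== Notes on version B (the rewrite author's own statement) =====
-- stated objective: alternative
-- what changed: B builds the result column-major: for each template position it materialises a whole column at once (the i-th value of every inner list for '*', a replicated literal otherwise) and then transposes the columns into rows, instead of A's row-by-row element rebuild.
import Mathlib
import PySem

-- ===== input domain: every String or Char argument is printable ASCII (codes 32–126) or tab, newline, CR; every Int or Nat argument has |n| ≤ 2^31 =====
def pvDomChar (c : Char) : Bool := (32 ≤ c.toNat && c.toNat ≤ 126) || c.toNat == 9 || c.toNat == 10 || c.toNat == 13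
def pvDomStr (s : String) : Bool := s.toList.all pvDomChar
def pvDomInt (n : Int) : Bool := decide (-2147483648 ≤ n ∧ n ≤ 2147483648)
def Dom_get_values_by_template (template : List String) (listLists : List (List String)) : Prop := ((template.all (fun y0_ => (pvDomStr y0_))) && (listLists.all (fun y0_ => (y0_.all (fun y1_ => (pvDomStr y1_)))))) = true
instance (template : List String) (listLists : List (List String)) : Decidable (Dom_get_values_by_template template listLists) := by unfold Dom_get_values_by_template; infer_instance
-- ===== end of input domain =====

-- B builds the result column-major (one full column per template position, then a transpose) instead of A's row-by-row rebuild; alternative decomposition, same cost.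

-- ===== PORT A =====
-- for each inner_list: rebuild the row element by element, branching on '*' at every position
def get_values_by_template (template : List String) (listLists : List (List String)) : List (List String) :=
  listLists.foldl (fun result inner_list =>
    result ++ [(PySem.List.enumerate template 0).foldl (fun cur ie =>
      cur ++ [if ie.2 == "*" then PySem.List.pyGetD inner_list ie.1 "" else ie.2]) []]) []

-- ===== PORT B =====
-- column-major: one column per template position (whole column at once), then transpose by index
def get_values_by_template_alt (template : List String) (listLists : List (List String)) : List (List String) :=
  let n : Int := listLists.length
  let cols : List (List String) := (PySem.List.enumerate template 0).foldl (fun cols ie =>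
    cols ++ [if ie.2 == "*" then listLists.map (fun inner => PySem.List.pyGetD inner ie.1 "")
             else List.replicate listLists.length ie.2]) []
  (PySem.List.pyRange 0 n 1).map (fun j => cols.map (fun col => PySem.List.pyGetD col j ""))

-- ===== PRECONDITION & SPEC =====
-- Pre_ excludes exactly the inputs on which Python A raises IndexError:
-- a wildcard position of the template that is out of range for some inner list.
def Pre_get_values_by_template (template : List String) (listLists : List (List String)) : Prop :=
  ∀ inner ∈ listLists, ∀ k : Fin template.length, template[k] = "*" → k.val < inner.length
instance (template : List String) (listLists : List (List String)) : Decidable (Pre_get_values_by_template template listLists) := by unfold Pre_get_values_by_template; infer_instance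

def pvWitness_get_values_by_template : List String × List (List String) :=
  (["*", "C", "*"], [["Am", "q", "F"], ["Dm", "r", "G"]])

def Spec_get_values_by_template (template : List String) (listLists : List (List String)) (out : List (List String)) : Prop := out = get_values_by_template_alt template listLists
instance (template : List String) (listLists : List (List String)) (out : List (List String)) : Decidable (Spec_get_values_by_template template listLists out) := by unfold Spec_get_values_by_template; infer_instance

-- ===== CLAIM (what is proved, stated in full; the proofs are below) =====
def Claim_equal_get_values_by_template : Prop := ∀ (template : List String) (listLists : List (List String)), Dom_get_values_by_template template listLists → Pre_get_values_by_template template listLists → Spec_get_values_by_template template listLists (get_values_by_template template listLists)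

-- ===== LEMMAS AND PROOFS =====

-- reading row k of B's columns yields A's row for listLists[k]
theorem col_read_eq (template : List String) (listLists : List (List String))
    (k : Nat) (hk : k < listLists.length) :
    (PySem.List.enumerate template 0).map (fun ie =>
        PySem.List.pyGetD
          (if ie.2 == "*" then listLists.map (fun inner => PySem.List.pyGetD inner ie.1 "")
           else List.replicate listLists.length ie.2) (k : Int) "") =
    (PySem.List.enumerate template 0).map (fun ie =>
        if ie.2 == "*" then PySem.List.pyGetD listLists[k] ie.1 "" else ie.2) := by
  apply List.map_congr_left
  intro ie _
  by_cases hs : ie.2 == "*"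
  · simp only [hs, if_pos]
    rw [PySem.List.pyGetD_natCast]
    rw [List.getD_eq_getElem _ _ (by simpa using hk)]
    simp
  · simp only [hs, if_neg, Bool.false_eq_true, not_false_iff]
    rw [PySem.List.pyGetD_natCast]
    rw [List.getD_eq_getElem _ _ (by simpa using hk)]
    simp

-- ===== VERDICT (by name: the statement is the Claim_ definition above) =====
theorem get_values_by_template_spec : Claim_equal_get_values_by_template := by
  intro template listLists _ _
  unfold Spec_get_values_by_template get_values_by_template get_values_by_template_alt
  simp only [PySem.List.foldl_append_singleton_eq_map, List.nil_append]
  rw [PySem.List.pyRange_one]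
  simp only [Int.zero_add, Int.sub_zero, Int.toNat_natCast]
  apply List.ext_getElem
  · simp
  · intro k h1 h2
    have hk : k < listLists.length := by simpa using h2
    simp only [List.getElem_map, List.getElem_range, List.map_map]
    have := col_read_eq template listLists k hk
    simpa [Function.comp] using this.symm
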